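-- pv_equiv track=rewrite | github.com/denniszubov/ECE-Calculator | helper_methods.py | characters
-- ===== SOURCE A (Python) =====
-- def characters(line: str):
--     line = line.upper()
--     chars = set()
--     for c in line:
--         if c in "ABCDEFGHIJKLMNOPQRSTUVWXYZ":
--             chars.add(c)
--     return_chars = list(chars)
--     return_chars.sort()
--     return return_chars
-- ===== SOURCE B (Python) =====
-- def characters(line: str):
--     up = line.upper()
--     return [letter for letter in "ABCDEFGHIJKLMNOPQRSTUVWXYZ" if letter in up]
-- ===== Notes on version B (the rewrite author's own statement) =====
-- stated objective: simpler
-- what changed: Instead of scanning the input character by character into a set and sorting it, B scans the fixed 26-letter alphabet in order and keeps each letter contained in line.upper(), so no set and no sort are needed and the per-character Python loop over the input is replaced by 26 C-level substring tests.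
import Mathlib
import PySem

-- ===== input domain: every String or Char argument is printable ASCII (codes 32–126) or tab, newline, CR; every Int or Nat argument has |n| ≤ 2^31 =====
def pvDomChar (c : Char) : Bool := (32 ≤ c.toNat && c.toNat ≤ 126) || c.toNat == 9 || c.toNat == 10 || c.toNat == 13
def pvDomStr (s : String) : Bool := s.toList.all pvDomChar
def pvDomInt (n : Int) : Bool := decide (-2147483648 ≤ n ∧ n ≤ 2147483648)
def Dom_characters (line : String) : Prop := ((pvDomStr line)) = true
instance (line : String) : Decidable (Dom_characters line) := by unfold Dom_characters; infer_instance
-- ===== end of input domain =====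

-- B scans the fixed alphabet instead of scanning the input into a set and sorting (objective: simpler, no set and no sort).

def pvAlpha : List Char := "ABCDEFGHIJKLMNOPQRSTUVWXYZ".toList

-- ===== PORT A =====
def characters (line : String) : List String :=
  let up := PySem.Chars.upper line.toList
  let chars : PySem.Set String := up.foldl
    (fun s c => if PySem.Chars.isIn [c] pvAlpha then PySem.Set.add s (String.ofList [c]) else s)
    PySem.Set.empty
  PySem.List.sorted chars (fun x => x) false

-- ===== PORT B =====
def characters_alt (line : String) : List String :=
  let up := PySem.Chars.upper line.toList
  (pvAlpha.filter (fun letter => PySem.Chars.isIn [letter] up)).map (fun c => String.ofList [c])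

-- ===== PRECONDITION & SPEC =====
def Spec_characters (line : String) (out : List String) : Prop := out = characters_alt line
instance (line : String) (out : List String) : Decidable (Spec_characters line out) := by unfold Spec_characters; infer_instance

-- ===== CLAIM (what is proved, stated in full; the proofs are below) =====
def Claim_equal_characters : Prop := ∀ (line : String), Dom_characters line → Spec_characters line (characters line)

-- ===== LEMMAS AND PROOFS =====

lemma singleton_infix_iff_mem {a : Char} {l : List Char} : [a] <:+: l ↔ a ∈ l := by
  constructor
  · intro h; exact h.mem (List.mem_singleton_self a)
  · intro h; obtain ⟨s, t, rfl⟩ := List.append_of_mem h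
    exact ⟨s, t, by simp⟩

lemma isIn_singleton_iff_mem {a : Char} {l : List Char} :
    PySem.Chars.isIn [a] l = true ↔ a ∈ l := by
  rw [PySem.Chars.isIn_iff_infix]; exact singleton_infix_iff_mem

lemma ofList_singleton_lt {a b : Char} (h : a < b) :
    String.ofList [a] < String.ofList [b] := by
  rw [String.lt_iff_toList_lt]
  have ha : (String.ofList [a]).toList = [a] := by simp
  have hb : (String.ofList [b]).toList = [b] := by simp
  rw [ha, hb]
  exact (List.lt_iff_lex_lt _ _).mpr (List.Lex.rel h)

lemma foldl_add_if_eq_ofList (P : Char → Bool) (f : Char → String) :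
    ∀ (up : List Char) (init : PySem.Set String),
      up.foldl (fun s c => if P c then PySem.Set.add s (f c) else s) init
        = ((up.filter P).map f).foldl PySem.Set.add init := by
  intro up
  induction up with
  | nil => intro init; simp
  | cons c cs ih =>
    intro init
    simp only [List.foldl_cons, List.filter_cons]
    by_cases hP : P c = true
    · simp [hP, ih]
    · simp [hP, ih]

lemma mem_alt_iff (up : List Char) (x : String) :
    (x ∈ (pvAlpha.filter (fun letter => PySem.Chars.isIn [letter] up)).map
          (fun c => String.ofList [c]))
      ↔ ∃ c, c ∈ up ∧ c ∈ pvAlpha ∧ String.ofList [c] = x := by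
  simp only [List.mem_map, List.mem_filter, isIn_singleton_iff_mem]
  constructor
  · rintro ⟨c, ⟨hc1, hc2⟩, rfl⟩; exact ⟨c, hc2, hc1, rfl⟩
  · rintro ⟨c, h1, h2, rfl⟩; exact ⟨c, ⟨h2, h1⟩, rfl⟩

lemma mem_a_iff (up : List Char) (x : String) :
    (x ∈ (up.filter (fun c => PySem.Chars.isIn [c] pvAlpha)).map
          (fun c => String.ofList [c]))
      ↔ ∃ c, c ∈ up ∧ c ∈ pvAlpha ∧ String.ofList [c] = x := by
  simp only [List.mem_map, List.mem_filter, isIn_singleton_iff_mem]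
  constructor
  · rintro ⟨c, ⟨hc1, hc2⟩, rfl⟩; exact ⟨c, hc1, hc2, rfl⟩
  · rintro ⟨c, h1, h2, rfl⟩; exact ⟨c, ⟨h1, h2⟩, rfl⟩

lemma alt_pairwise_lt (up : List Char) :
    ((pvAlpha.filter (fun letter => PySem.Chars.isIn [letter] up)).map
        (fun c => String.ofList [c])).Pairwise (· < ·) := by
  have halpha : pvAlpha.Pairwise (· < ·) := by decide
  have h1 : (pvAlpha.map (fun c => String.ofList [c])).Pairwise (· < ·) :=
    (List.pairwise_map).mpr (halpha.imp (fun h => ofList_singleton_lt h))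
  exact h1.sublist (List.Sublist.map _ List.filter_sublist)

lemma characters_eq_alt (line : String) : characters line = characters_alt line := by
  unfold characters characters_alt
  set up := PySem.Chars.upper line.toList with hup
  simp only []
  rw [show (PySem.Set.empty : PySem.Set String) = ([] : List String) from rfl] at *
  rw [foldl_add_if_eq_ofList]
  have hofl : ((up.filter (fun c => PySem.Chars.isIn [c] pvAlpha)).map
        (fun c => String.ofList [c])).foldl PySem.Set.add ([] : List String)
      = PySem.Set.ofList ((up.filter (fun c => PySem.Chars.isIn [c] pvAlpha)).map
        (fun c => String.ofList [c])) := rfl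
  rw [hofl]
  apply PySem.List.sorted_eq_of_perm_of_pairwise_lt
  · -- the alt list is a permutation of the deduplicated set
    have hnodup_alt : ((pvAlpha.filter (fun letter => PySem.Chars.isIn [letter] up)).map
        (fun c => String.ofList [c])).Nodup :=
      (alt_pairwise_lt up).imp (fun h => ne_of_lt h)
    have hnodup_set := PySem.Set.nodup_ofList
      (xs := (up.filter (fun c => PySem.Chars.isIn [c] pvAlpha)).map (fun c => String.ofList [c]))
    rw [List.perm_ext_iff_of_nodup hnodup_alt hnodup_set]
    intro x
    rw [PySem.Set.mem_ofList, mem_a_iff, mem_alt_iff]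
  · exact alt_pairwise_lt up

-- ===== VERDICT (by name: the statement is the Claim_ definition above) =====
theorem characters_spec : Claim_equal_characters := by
  intro line _
  unfold Spec_characters
  exact characters_eq_alt line
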